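-- pv_equiv track=rewrite | github.com/amlei/lifeink | backend/src/community/douban/scrapers/books.py | _parse_pub
-- ===== SOURCE A (Python) =====
-- def _parse_pub(text: str) -> dict:
--     parts = [s.strip() for s in text.split("/")]
--     n = len(parts)
--     author = parts[0] if n >= 1 else None
--     translator = parts[1] if n == 5 else None
--     publisher = parts[2] if n == 5 else (parts[1] if n >= 3 else None)
--     pub_date = parts[3] if n == 5 else (parts[2] if n >= 3 else (parts[1] if n == 2 else None))
--     price = parts[4] if n == 5 else (parts[3] if n == 4 else None)
--     return {"author": author, "translator": translator, "publisher": publisher, "pub_date": pub_date, "price": price}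
-- ===== SOURCE B (Python) =====
-- _LAYOUTS = {
--     1: ["author"],
--     2: ["author", "pub_date"],
--     3: ["author", "publisher", "pub_date"],
--     4: ["author", "publisher", "pub_date", "price"],
--     5: ["author", "translator", "publisher", "pub_date", "price"],
-- }
--
--
-- def _parse_pub(text: str) -> dict:
--     parts = [s.strip() for s in text.split("/")]
--     n = len(parts)
--     result = {"author": None, "translator": None, "publisher": None,
--               "pub_date": None, "price": None}
--     layout = _LAYOUTS.get(n, ["author", "publisher", "pub_date"])
--     for i, field in enumerate(layout):
--         result[field] = parts[i]
--     return result
-- ===== Notes on version B (the rewrite author's own statement) =====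
-- stated objective: simpler
-- what changed: Replaces A's five per-field nested conditional expressions by a layout table mapping the part count to the ordered list of filled field names, written into an all-None dict in one loop.
import Mathlib
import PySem

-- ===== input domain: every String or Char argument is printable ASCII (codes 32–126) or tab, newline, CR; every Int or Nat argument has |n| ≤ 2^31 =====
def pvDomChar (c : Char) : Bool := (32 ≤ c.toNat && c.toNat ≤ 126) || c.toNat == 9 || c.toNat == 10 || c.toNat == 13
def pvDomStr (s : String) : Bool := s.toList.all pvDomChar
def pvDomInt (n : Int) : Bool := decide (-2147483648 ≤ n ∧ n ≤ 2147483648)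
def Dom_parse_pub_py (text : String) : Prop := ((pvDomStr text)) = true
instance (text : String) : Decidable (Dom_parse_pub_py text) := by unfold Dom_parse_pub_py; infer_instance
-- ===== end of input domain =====

-- B replaces A's five per-field conditional chains by a single layout table (field names per
-- part count) written into an all-None dict; objective: simpler. Equivalence proved on all inputs.

-- ===== PORT A =====
-- body after computing parts/n; pyGet? (exact Python indexing) is some under each guard
def parse_pub_py_core (parts : List String) : List (String × Option String) :=
  let n := parts.length
  let author := if n ≥ 1 then PySem.List.pyGet? parts 0 else none
  let translator := if n = 5 then PySem.List.pyGet? parts 1 else none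
  let publisher := if n = 5 then PySem.List.pyGet? parts 2
                   else if n ≥ 3 then PySem.List.pyGet? parts 1 else none
  let pub_date := if n = 5 then PySem.List.pyGet? parts 3
                  else if n ≥ 3 then PySem.List.pyGet? parts 2
                  else if n = 2 then PySem.List.pyGet? parts 1 else none
  let price := if n = 5 then PySem.List.pyGet? parts 4
               else if n = 4 then PySem.List.pyGet? parts 3 else none
  [("author", author), ("translator", translator), ("publisher", publisher),
   ("pub_date", pub_date), ("price", price)]

def parse_pub_py (text : String) : List (String × Option String) :=
  parse_pub_py_core (((PySem.Str.split? text "/").getD []).map PySem.Str.strip)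

-- ===== PORT B =====
def pvLayouts : PySem.Dict Int (List String) :=
  PySem.Dict.mk [(1, ["author"]), (2, ["author", "pub_date"]),
                 (3, ["author", "publisher", "pub_date"]),
                 (4, ["author", "publisher", "pub_date", "price"]),
                 (5, ["author", "translator", "publisher", "pub_date", "price"])]

-- body after computing parts: all-None dict, then result[field] = parts[i] along the layout
def parse_pub_py_alt_core (parts : List String) : List (String × Option String) :=
  let result : PySem.Dict String (Option String) :=
    PySem.Dict.mk [("author", none), ("translator", none), ("publisher", none),
                   ("pub_date", none), ("price", none)]
  let layout := pvLayouts.getD (parts.length : Int) ["author", "publisher", "pub_date"]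
  let result := (PySem.List.enumerate layout).foldl
    (fun r p => r.insert p.2 (PySem.List.pyGet? parts p.1)) result
  result.items

def parse_pub_py_alt (text : String) : List (String × Option String) :=
  parse_pub_py_alt_core (((PySem.Str.split? text "/").getD []).map PySem.Str.strip)

-- ===== PRECONDITION & SPEC =====
def Spec_parse_pub_py (text : String) (out : List (String × Option String)) : Prop := out = parse_pub_py_alt text
instance (text : String) (out : List (String × Option String)) : Decidable (Spec_parse_pub_py text out) := by unfold Spec_parse_pub_py; infer_instance

-- ===== CLAIM (what is proved, stated in full; the proofs are below) =====
def Claim_equal_parse_pub_py : Prop := ∀ (text : String), Dom_parse_pub_py text → Spec_parse_pub_py text (parse_pub_py text)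

-- ===== LEMMAS AND PROOFS =====
theorem parse_pub_core_eq (parts : List String) :
    parse_pub_py_core parts = parse_pub_py_alt_core parts := by
  match parts with
  | [] => simp [parse_pub_py_core, parse_pub_py_alt_core, pvLayouts, PySem.List.enumerate,
            PySem.Dict.getD, PySem.Dict.get?, PySem.Dict.insert, PySem.Dict.contains,
            PySem.List.pyGet?, PySem.List.pyIdx?]
  | [a] => simp [parse_pub_py_core, parse_pub_py_alt_core, pvLayouts, PySem.List.enumerate,
            PySem.Dict.getD, PySem.Dict.get?, PySem.Dict.insert, PySem.Dict.contains,
            PySem.List.pyGet?, PySem.List.pyIdx?]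
  | [a, b] => simp [parse_pub_py_core, parse_pub_py_alt_core, pvLayouts, PySem.List.enumerate,
            PySem.Dict.getD, PySem.Dict.get?, PySem.Dict.insert, PySem.Dict.contains,
            PySem.List.pyGet?, PySem.List.pyIdx?]
  | [a, b, c] => simp [parse_pub_py_core, parse_pub_py_alt_core, pvLayouts, PySem.List.enumerate,
            PySem.Dict.getD, PySem.Dict.get?, PySem.Dict.insert, PySem.Dict.contains,
            PySem.List.pyGet?, PySem.List.pyIdx?]
  | [a, b, c, d] => simp [parse_pub_py_core, parse_pub_py_alt_core, pvLayouts, PySem.List.enumerate,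
            PySem.Dict.getD, PySem.Dict.get?, PySem.Dict.insert, PySem.Dict.contains,
            PySem.List.pyGet?, PySem.List.pyIdx?]
  | [a, b, c, d, e] => simp [parse_pub_py_core, parse_pub_py_alt_core, pvLayouts, PySem.List.enumerate,
            PySem.Dict.getD, PySem.Dict.get?, PySem.Dict.insert, PySem.Dict.contains,
            PySem.List.pyGet?, PySem.List.pyIdx?]
  | a :: b :: c :: d :: e :: f :: t =>
      have hk : ∀ k : Int, k ∈ ([1, 2, 3, 4, 5] : List Int) →
          (k == (t.length : Int) + 1 + 1 + 1 + 1 + 1 + 1) = false := by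
        intro k hk; simp at hk ⊢; omega
      have hp0 : (0 : Int) ≤ (t.length : Int) + 1 + 1 + 1 + 1 + 1 := by omega
      simp [parse_pub_py_core, parse_pub_py_alt_core, pvLayouts, PySem.List.enumerate,
            PySem.Dict.getD, PySem.Dict.get?, PySem.Dict.insert, PySem.Dict.contains,
            PySem.List.pyGet?, PySem.List.pyIdx?,
            hk 1 (by simp), hk 2 (by simp), hk 3 (by simp), hk 4 (by simp), hk 5 (by simp),
            hp0]

-- ===== VERDICT (by name: the statement is the Claim_ definition above) =====
theorem parse_pub_py_spec : Claim_equal_parse_pub_py := by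
  intro text _
  unfold Spec_parse_pub_py parse_pub_py parse_pub_py_alt
  exact parse_pub_core_eq _
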